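-- pv_equiv track=rewrite | github.com/qingquan-li/CISC3160ProgrammingLanguages | final-sample/question5.py | replicate
-- ===== SOURCE A (Python) =====
-- def replicate(lst, n):
--     """
--     Recursively replicate each element of lst n times.
--     E.g. replicate(['a','b'], 3) → ['a','a','a','b','b','b']
--     """
--     # Base cases:
--     if n <= 0 or not lst:
--         return []
--     # Helper to replicate a single element x n times
--     def replicate_one(x, count):
--         if count <= 0:
--             return []
--         # prepend x and recurse
--         return [x] + replicate_one(x, count - 1)
--
--     # Replicate the head, then recurse on the tail
--     head, *tail = lst
--     return replicate_one(head, n) + replicate(tail, n)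
-- ===== SOURCE B (Python) =====
-- def replicate(lst, n):
--     result = []
--     for x in lst:
--         for _ in range(n):
--             result.append(x)
--     return result
-- ===== Notes on version B (the rewrite author's own statement) =====
-- stated objective: faster
-- what changed: Replaces A's double recursion (per-element helper recursion plus tail recursion, each level concatenating fresh lists) by a single iterative nested loop appending to one accumulator; range(n) being empty for n<=0 covers A's base case without a guard. Pre_ excludes exactly the inputs on which A raises RecursionError (n>0, lst nonempty, len(lst)+n >= 998, past CPython's default recursion limit); B returns the replicated list there.
import Mathlib
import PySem

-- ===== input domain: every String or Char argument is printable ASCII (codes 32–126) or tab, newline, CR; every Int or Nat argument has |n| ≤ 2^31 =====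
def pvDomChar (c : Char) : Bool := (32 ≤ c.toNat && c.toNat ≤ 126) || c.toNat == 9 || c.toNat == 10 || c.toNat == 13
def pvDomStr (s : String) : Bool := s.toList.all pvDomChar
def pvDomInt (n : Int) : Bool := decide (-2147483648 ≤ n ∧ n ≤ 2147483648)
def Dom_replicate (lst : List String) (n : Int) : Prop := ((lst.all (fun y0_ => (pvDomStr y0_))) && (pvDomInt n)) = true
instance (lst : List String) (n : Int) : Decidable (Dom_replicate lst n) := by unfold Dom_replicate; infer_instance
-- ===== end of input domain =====

-- B replaces A's double recursion (which rebuilds lists by concatenation at every level) with one iterative nested append loop; a timing run measured B faster.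


-- ===== PORT A =====
def replicate_one (x : String) (count : Int) : List String :=
  if count ≤ 0 then []
  else [x] ++ replicate_one x (count - 1)
termination_by count.toNat
decreasing_by omega

def replicate (lst : List String) (n : Int) : List String :=
  if n ≤ 0 || lst.isEmpty then []
  else
    match lst with
    | [] => []
    | head :: tail => replicate_one head n ++ replicate tail n

-- ===== PORT B =====
def replicate_alt (lst : List String) (n : Int) : List String :=
  lst.foldl (fun result x =>
    (PySem.List.pyRange 0 n 1).foldl (fun result _ => result ++ [x]) result) []

-- ===== PRECONDITION & SPEC =====
-- Pre_ excludes exactly the inputs on which A's recursion depth (len(lst)+n interpreter frames)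
-- exceeds CPython's default recursion limit and A raises RecursionError; measured boundary:
-- A returns for len(lst)+n <= 997 and raises for len(lst)+n >= 998 (when n > 0 and lst nonempty).
def Pre_replicate (lst : List String) (n : Int) : Prop :=
  n ≤ 0 ∨ lst = [] ∨ (lst.length : Int) + n ≤ 997
instance (lst : List String) (n : Int) : Decidable (Pre_replicate lst n) := by
  unfold Pre_replicate; infer_instance
def pvWitness_replicate : List String × Int := (["a", "b"], 3)

def Spec_replicate (lst : List String) (n : Int) (out : List String) : Prop := out = replicate_alt lst n
instance (lst : List String) (n : Int) (out : List String) : Decidable (Spec_replicate lst n out) := by unfold Spec_replicate; infer_instance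

-- ===== CLAIM (what is proved, stated in full; the proofs are below) =====
def Claim_equal_replicate : Prop := ∀ (lst : List String) (n : Int), Dom_replicate lst n → Pre_replicate lst n → Spec_replicate lst n (replicate lst n)

-- ===== LEMMAS AND PROOFS =====
theorem replicate_one_eq (x : String) : ∀ (k : Nat) (n : Int), n.toNat = k →
    replicate_one x n = List.replicate k x := by
  intro k
  induction k with
  | zero =>
    intro n hn
    rw [replicate_one, if_pos (by omega)]
    rfl
  | succ m ih =>
    intro n hn
    rw [replicate_one, if_neg (by omega)]
    rw [ih (n - 1) (by omega)]
    rfl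

theorem foldl_append_replicate (x : String) : ∀ (l : List Int) (acc : List String),
    l.foldl (fun r _ => r ++ [x]) acc = acc ++ List.replicate l.length x := by
  intro l
  induction l with
  | nil => intro acc; simp
  | cons h t ih =>
    intro acc
    simp only [List.foldl_cons, List.length_cons, ih]
    simp [List.replicate_succ]

theorem foldl_acc_replicate (k : Nat) : ∀ (t : List String) (acc : List String),
    t.foldl (fun r x => r ++ List.replicate k x) acc
      = acc ++ t.flatMap (fun x => List.replicate k x) := by
  intro t
  induction t with
  | nil => intro acc; simp
  | cons h t ih =>
    intro acc
    simp only [List.foldl_cons, ih]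
    simp [List.flatMap_cons, List.append_assoc]

theorem replicate_alt_eq (lst : List String) (n : Int) :
    replicate_alt lst n = lst.flatMap (fun x => List.replicate n.toNat x) := by
  unfold replicate_alt
  simp only [foldl_append_replicate, PySem.List.length_pyRange_one, Int.sub_zero]
  rw [foldl_acc_replicate]
  simp

theorem replicate_eq_flatMap : ∀ (lst : List String) (n : Int),
    replicate lst n = lst.flatMap (fun x => List.replicate n.toNat x) := by
  intro lst
  induction lst with
  | nil => intro n; rw [replicate]; simp
  | cons h t ih =>
    intro n
    rw [replicate]
    by_cases hn : n ≤ 0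
    · rw [if_pos (by simp [hn])]
      have : n.toNat = 0 := by omega
      simp [this]
    · rw [if_neg (by simp [hn])]
      rw [replicate_one_eq h n.toNat n rfl, ih n]
      simp [List.flatMap_cons]

-- ===== VERDICT (by name: the statement is the Claim_ definition above) =====
theorem replicate_spec : Claim_equal_replicate := by
  intro lst n _ _
  unfold Spec_replicate
  rw [replicate_alt_eq, replicate_eq_flatMap]
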